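-- pv_equiv track=rewrite | github.com/szapf70/codecomp | codewars/python/active/missingAlphabets.py | missing_alphabets
-- ===== SOURCE A (Python) =====
-- def missing_alphabets(st):
--     ba = list("abcdefghijklmnopqrstuvwxyz")
--     res = ba.copy()
--     for l in st:
--         if l in res:
--             res.remove(l)
--         else:
--             res.extend(ba)
--             res.remove(l)
--     return "".join(sorted(res))
-- ===== SOURCE B (Python) =====
-- def missing_alphabets(st):
--     ba = list("abcdefghijklmnopqrstuvwxyz")
--     occ = [0] * 26
--     for ch in st:
--         occ[ba.index(ch)] += 1
--     k = max(occ) or 1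
--     return "".join(c * (k - n) for c, n in zip(ba, occ))
-- ===== Notes on version B (the rewrite author's own statement) =====
-- stated objective: faster
-- what changed: Replaces the repeated membership/remove/extend list simulation (each a linear scan over a growing list, plus a final sort) by a single counting pass over a 26-slot occurrence array: k = max occurrence (or 1) and each letter a..z is emitted k-count times, already in sorted order.
import Mathlib
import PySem

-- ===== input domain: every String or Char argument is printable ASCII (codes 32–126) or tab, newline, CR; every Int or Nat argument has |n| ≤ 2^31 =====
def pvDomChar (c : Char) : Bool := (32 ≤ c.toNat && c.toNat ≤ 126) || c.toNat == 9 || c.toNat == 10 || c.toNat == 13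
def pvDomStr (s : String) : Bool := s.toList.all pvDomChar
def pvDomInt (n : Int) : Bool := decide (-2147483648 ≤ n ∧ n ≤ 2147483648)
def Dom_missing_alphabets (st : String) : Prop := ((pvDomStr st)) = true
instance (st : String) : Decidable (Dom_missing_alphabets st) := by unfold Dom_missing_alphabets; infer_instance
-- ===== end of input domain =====

-- B replaces A's repeated remove/extend list simulation by a single counting pass
-- (k = max occurrence, each letter emitted k - count times, already in order); objective: faster.

-- ===== PORT A =====
def pvBa : List Char := "abcdefghijklmnopqrstuvwxyz".toList

-- one step of A's loop body; 'none' marks the ValueError of list.remove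
def pvStepA (acc : Option (List Char)) (l : Char) : Option (List Char) :=
  match acc with
  | none => none
  | some res =>
    if l ∈ res then PySem.List.remove? res l
    else PySem.List.remove? (res ++ pvBa) l

def missing_alphabets (st : String) : String :=
  match st.toList.foldl pvStepA (some pvBa) with
  | some res => String.ofList (PySem.List.sorted res (fun x => x) false)
  | none => ""  -- unreachable under Pre_: Python raises ValueError here

-- ===== PORT B =====
-- one step of B's loop body; 'none' marks the ValueError of ba.index(ch);
-- occ[i] += 1 never raises in Python (i < 26 = len occ), so pySetD/pyGetD are exact here
def pvStepB (acc : Option (List Int)) (ch : Char) : Option (List Int) :=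
  match acc with
  | none => none
  | some occ =>
    match PySem.List.index? pvBa ch with
    | none => none
    | some i => some (PySem.List.pySetD occ (i : Int) (PySem.List.pyGetD occ (i : Int) 0 + 1))

def missing_alphabets_alt (st : String) : String :=
  match st.toList.foldl pvStepB (some (List.replicate 26 (0 : Int))) with
  | some occ =>
    -- max(occ) cannot raise: occ is the 26-slot array; 'or 1' is Python's falsy test on 0
    let m : Int := (PySem.List.max? occ (fun x => x)).getD 0
    let k : Int := if m = 0 then 1 else m
    String.ofList ((pvBa.zip occ).flatMap (fun p => List.replicate (k - p.2).toNat p.1))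
  | none => ""  -- unreachable under Pre_: Python raises ValueError here

-- ===== PRECONDITION & SPEC =====
-- Pre_ excludes exactly the inputs containing a character outside a–z, on which A raises ValueError.
def Pre_missing_alphabets (st : String) : Prop := st.toList.all (fun c => pvBa.contains c) = true
instance (st : String) : Decidable (Pre_missing_alphabets st) := by unfold Pre_missing_alphabets; infer_instance

def pvWitness_missing_alphabets : String := "hello"

def Spec_missing_alphabets (st : String) (out : String) : Prop := out = missing_alphabets_alt st
instance (st : String) (out : String) : Decidable (Spec_missing_alphabets st out) := by unfold Spec_missing_alphabets; infer_instance

-- ===== CLAIM (what is proved, stated in full; the proofs are below) =====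
def Claim_equal_missing_alphabets : Prop := ∀ (st : String), Dom_missing_alphabets st → Pre_missing_alphabets st → Spec_missing_alphabets st (missing_alphabets st)

-- ===== LEMMAS AND PROOFS =====

theorem pre_forall (st : String) (h : Pre_missing_alphabets st) : ∀ c ∈ st.toList, c ∈ pvBa := by
  unfold Pre_missing_alphabets at h
  simpa [List.all_eq_true] using h

-- the maximum occurrence count (at least 1) of an alphabet letter in l
def pvK (l : List Char) : Nat := pvBa.foldl (fun m c => max m (l.count c)) 1

-- the canonical leftover multiset: each letter, pvK l - count times, in alphabetical order
def pvM (l : List Char) : List Char := pvBa.flatMap (fun c => List.replicate (pvK l - l.count c) c)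

theorem pvBa_pairwise : pvBa.Pairwise (· < ·) := by decide

theorem pvBa_nodup : pvBa.Nodup := pvBa_pairwise.imp (fun h => ne_of_lt h)

theorem foldl_max_ge {α : Type} (f : α → Nat) : ∀ (l : List α) (a : Nat), a ≤ l.foldl (fun m c => max m (f c)) a := by
  intro l
  induction l with
  | nil => intro a; simp
  | cons x xs ih => intro a; exact le_trans (le_max_left _ _) (ih _)

theorem mem_le_foldl_max {α : Type} (f : α → Nat) : ∀ (l : List α) (a : Nat), ∀ x ∈ l, f x ≤ l.foldl (fun m c => max m (f c)) a := by
  intro l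
  induction l with
  | nil => intro a x hx; simp at hx
  | cons y ys ih =>
    intro a x hx
    rcases List.mem_cons.mp hx with h | h
    · subst h; exact le_trans (le_max_right _ _) (foldl_max_ge f ys _)
    · exact ih _ x h

theorem foldl_max_le {α : Type} (f : α → Nat) : ∀ (l : List α) (a b : Nat), a ≤ b → (∀ x ∈ l, f x ≤ b) → l.foldl (fun m c => max m (f c)) a ≤ b := by
  intro l
  induction l with
  | nil => intro a b hab _; simpa
  | cons y ys ih =>
    intro a b hab hall
    exact ih _ b (max_le hab (hall y (by simp))) (fun x hx => hall x (by simp [hx]))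

theorem count_le_pvK (l : List Char) (c : Char) (hc : c ∈ pvBa) : l.count c ≤ pvK l := by
  unfold pvK; exact mem_le_foldl_max (fun d => l.count d) pvBa 1 c hc

theorem one_le_pvK (l : List Char) : 1 ≤ pvK l := foldl_max_ge _ pvBa 1

theorem count_flatMap_replicate (n : Char → Nat) : ∀ (cs : List Char), cs.Nodup →
    ∀ c, (cs.flatMap (fun d => List.replicate (n d) d)).count c = if c ∈ cs then n c else 0 := by
  intro cs
  induction cs with
  | nil => intro _ c; simp
  | cons d ds ih =>
    intro hnd c
    rw [List.flatMap_cons, List.count_append, ih hnd.of_cons c, List.count_replicate]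
    by_cases hdc : d = c
    · subst hdc
      have hnm : d ∉ ds := (List.nodup_cons.mp hnd).1
      simp [hnm]
    · simp [hdc, Ne.symm hdc, List.mem_cons]

theorem count_pvM (l : List Char) (c : Char) :
    (pvM l).count c = if c ∈ pvBa then pvK l - l.count c else 0 :=
  count_flatMap_replicate _ pvBa pvBa_nodup c

theorem count_append_singleton (l : List Char) (x c : Char) :
    (l ++ [x]).count c = l.count c + (if c = x then 1 else 0) := by
  by_cases hcx : c = x
  · subst hcx; simp
  · simp [List.count_append, hcx, Ne.symm hcx]

theorem pvK_append_lt (done : List Char) (x : Char) (hx : x ∈ pvBa)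
    (h : done.count x < pvK done) : pvK (done ++ [x]) = pvK done := by
  apply le_antisymm
  · apply foldl_max_le _ pvBa 1 (pvK done) (one_le_pvK done)
    intro c hc
    rw [count_append_singleton]
    by_cases hcx : c = x
    · subst hcx; simpa using h
    · simpa [hcx] using count_le_pvK done c hc
  · apply foldl_max_le _ pvBa 1 (pvK (done ++ [x])) (one_le_pvK (done ++ [x]))
    intro c hc
    have h2 := count_le_pvK (done ++ [x]) c hc
    rw [count_append_singleton] at h2
    omega

theorem pvK_append_eq (done : List Char) (x : Char) (hx : x ∈ pvBa)
    (h : done.count x = pvK done) : pvK (done ++ [x]) = pvK done + 1 := by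
  apply le_antisymm
  · apply foldl_max_le _ pvBa 1 (pvK done + 1) (by omega)
    intro c hc
    rw [count_append_singleton]
    have := count_le_pvK done c hc
    by_cases hcx : c = x <;> simp [hcx] <;> omega
  · have := count_le_pvK (done ++ [x]) x hx
    rw [count_append_singleton, if_pos rfl] at this
    omega

theorem erase_pvM_lt (done : List Char) (x : Char) (hx : x ∈ pvBa)
    (h : done.count x < pvK done) : ((pvM done).erase x).Perm (pvM (done ++ [x])) := by
  rw [List.perm_iff_count]
  intro c
  rw [List.count_erase, count_pvM, count_pvM, pvK_append_lt done x hx h, count_append_singleton]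
  simp only [beq_iff_eq]
  by_cases hc : c ∈ pvBa
  · simp only [if_pos hc]
    by_cases hcx : c = x
    · subst hcx; simp; omega
    · simp [hcx, Ne.symm hcx]
  · simp only [if_neg hc]
    have hcx : ¬ (x = c) := fun hh => hc (hh ▸ hx)
    simp [hcx]

theorem count_pvBa (c : Char) : pvBa.count c = if c ∈ pvBa then 1 else 0 := by
  by_cases hc : c ∈ pvBa
  · simp [hc, List.count_eq_one_of_mem pvBa_nodup hc]
  · simp [hc, List.count_eq_zero_of_not_mem hc]

theorem erase_pvM_eq (done : List Char) (x : Char) (hx : x ∈ pvBa)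
    (h : done.count x = pvK done) : ((pvM done ++ pvBa).erase x).Perm (pvM (done ++ [x])) := by
  rw [List.perm_iff_count]
  intro c
  rw [List.count_erase, List.count_append, count_pvM, count_pvM,
      pvK_append_eq done x hx h, count_append_singleton, count_pvBa]
  simp only [beq_iff_eq]
  by_cases hc : c ∈ pvBa
  · simp only [if_pos hc]
    have h1 := count_le_pvK done c hc
    by_cases hcx : c = x
    · subst hcx; simp
    · simp [hcx, Ne.symm hcx]; omega
  · simp only [if_neg hc]
    have hcx : ¬ (x = c) := fun hh => hc (hh ▸ hx)
    simp [hcx]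

theorem pairwise_flatMap_replicate : ∀ (cs : List Char), cs.Pairwise (· < ·) → ∀ n : Char → Nat,
    (cs.flatMap (fun c => List.replicate (n c) c)).Pairwise (· ≤ ·) := by
  intro cs
  induction cs with
  | nil => intro _ n; simp
  | cons c cs ih =>
    intro hp n
    rw [List.flatMap_cons, List.pairwise_append]
    refine ⟨List.pairwise_replicate.mpr (Or.inr le_rfl), ih hp.of_cons n, ?_⟩
    intro a ha b hb
    rw [List.eq_of_mem_replicate ha]
    obtain ⟨d, hd, hbd⟩ := List.mem_flatMap.mp hb
    rw [List.eq_of_mem_replicate hbd]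
    exact le_of_lt (List.rel_of_pairwise_cons hp hd)

-- the loop invariant: res stays a permutation of the canonical leftover multiset
theorem pvStepA_inv : ∀ (l : List Char), ∀ (done res : List Char), (∀ c ∈ l, c ∈ pvBa) →
    res.Perm (pvM done) →
    ∃ r, l.foldl pvStepA (some res) = some r ∧ r.Perm (pvM (done ++ l)) := by
  intro l
  induction l with
  | nil => intro done res _ hp; exact ⟨res, rfl, by simpa using hp⟩
  | cons x xs ih =>
    intro done res hall hp
    have hx : x ∈ pvBa := hall x (by simp)
    have hcle := count_le_pvK done x hx
    have hcount : res.count x = pvK done - done.count x := by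
      rw [hp.count_eq, count_pvM, if_pos hx]
    rw [List.foldl_cons]
    by_cases hmem : x ∈ res
    · have hlt : done.count x < pvK done := by
        have := List.count_pos_iff.mpr hmem
        omega
      have hstep : pvStepA (some res) x = some (res.erase x) := by
        simp [pvStepA, hmem, PySem.List.remove?_eq_some_erase res x hmem]
      rw [hstep]
      have hperm : (res.erase x).Perm (pvM (done ++ [x])) :=
        (hp.erase x).trans (erase_pvM_lt done x hx hlt)
      obtain ⟨r, hr, hrp⟩ := ih (done ++ [x]) (res.erase x) (fun c hc => hall c (by simp [hc])) hperm
      exact ⟨r, hr, by simpa [List.append_assoc] using hrp⟩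
    · have heq : done.count x = pvK done := by
        have : res.count x = 0 := List.count_eq_zero_of_not_mem hmem
        omega
      have hmem2 : x ∈ res ++ pvBa := by simp [hx]
      have hstep : pvStepA (some res) x = some ((res ++ pvBa).erase x) := by
        simp [pvStepA, hmem, PySem.List.remove?_eq_some_erase _ x hmem2]
      rw [hstep]
      have hperm : ((res ++ pvBa).erase x).Perm (pvM (done ++ [x])) :=
        ((hp.append_right pvBa).erase x).trans (erase_pvM_eq done x hx heq)
      obtain ⟨r, hr, hrp⟩ := ih (done ++ [x]) ((res ++ pvBa).erase x) (fun c hc => hall c (by simp [hc])) hperm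
      exact ⟨r, hr, by simpa [List.append_assoc] using hrp⟩

theorem missing_alphabets_eq_pvM (st : String) (h : Pre_missing_alphabets st) :
    missing_alphabets st = String.ofList (pvM st.toList) := by
  have hstart : pvBa.Perm (pvM []) := by
    have : pvM [] = pvBa := by decide
    rw [this]
  obtain ⟨r, hr, hrp⟩ := pvStepA_inv st.toList [] pvBa (pre_forall st h) hstart
  unfold missing_alphabets
  rw [hr]
  show String.ofList (PySem.List.sorted r (fun x => x) false) = String.ofList (pvM st.toList)
  have hs : PySem.List.sorted r (fun x => x) false = PySem.List.sorted (pvM st.toList) (fun x => x) false :=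
    (PySem.List.sorted_id_eq_sorted_id_iff_perm r (pvM st.toList)).mpr (by simpa using hrp)
  have hpair : (pvM st.toList).Pairwise (fun a b => a ≤ b) := by
    unfold pvM; exact pairwise_flatMap_replicate pvBa pvBa_pairwise _
  rw [hs, PySem.List.sorted_eq_self_of_pairwise _ _ hpair]

theorem occ_map_step (f : Char → Int) (x : Char) (i : Nat) (hi : i < pvBa.length)
    (hgi : pvBa[i] = x) :
    PySem.List.pySetD (pvBa.map f) ((i : Nat) : Int)
        (PySem.List.pyGetD (pvBa.map f) ((i : Nat) : Int) 0 + 1)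
      = pvBa.map (fun c => f c + (if c = x then 1 else 0)) := by
  have hget : PySem.List.pyGetD (pvBa.map f) ((i : Nat) : Int) 0 = f x := by
    rw [PySem.List.pyGetD_natCast, List.getD_eq_getElem _ _ (by simpa using hi)]
    simp [hgi]
  rw [hget, PySem.List.pySetD_natCast]
  apply List.ext_getElem (by simp)
  intro j hj hj'
  rw [List.getElem_set]
  simp only [List.getElem_map]
  by_cases hje : i = j
  · subst hje
    simp [hgi]
  · have hne : pvBa[j]'(by simpa using hj') ≠ x := by
      intro heq
      apply hje
      have : (⟨i, hi⟩ : Fin pvBa.length) = ⟨j, by simpa using hj'⟩ :=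
        List.nodup_iff_injective_getElem.mp pvBa_nodup (by simp [hgi, heq])
      simpa using congrArg Fin.val this
    simp [hje, hne]

-- B's loop invariant: occ stays the per-letter count vector of the processed prefix
theorem pvStepB_inv : ∀ (l : List Char), ∀ (done : List Char), (∀ c ∈ l, c ∈ pvBa) →
    l.foldl pvStepB (some (pvBa.map (fun c => ((done.count c : Nat) : Int))))
      = some (pvBa.map (fun c => (((done ++ l).count c : Nat) : Int))) := by
  intro l
  induction l with
  | nil => intro done _; simp
  | cons x xs ih =>
    intro done hall
    have hx : x ∈ pvBa := hall x (by simp)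
    rw [List.foldl_cons]
    have hstep : pvStepB (some (pvBa.map (fun c => ((done.count c : Nat) : Int)))) x
        = some (pvBa.map (fun c => (((done ++ [x]).count c : Nat) : Int))) := by
      cases hidx : PySem.List.index? pvBa x with
      | none => exact absurd ((PySem.List.index?_eq_none_iff _ _).mp hidx) (by simpa using hx)
      | some i =>
        rw [PySem.List.index?_eq_idxOf?] at hidx
        obtain ⟨hi, hgi, -⟩ := List.idxOf?_eq_some_iff.mp hidx
        simp only [pvStepB, PySem.List.index?_eq_idxOf?, hidx]
        rw [occ_map_step _ x i hi hgi]
        congr 1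
        apply List.map_congr_left
        intro c _
        rw [count_append_singleton]
        by_cases hcx : c = x <;> simp [hcx]
    rw [hstep, ih (done ++ [x]) (fun c hc => hall c (by simp [hc]))]
    simp

theorem max_occ_eq_pvK (xs : List Char) :
    (if ((PySem.List.max? (pvBa.map (fun c => ((xs.count c : Nat) : Int))) (fun x => x)).getD 0) = 0
       then (1 : Int)
       else (PySem.List.max? (pvBa.map (fun c => ((xs.count c : Nat) : Int))) (fun x => x)).getD 0)
      = (pvK xs : Int) := by
  cases hmax : PySem.List.max? (pvBa.map (fun c => ((xs.count c : Nat) : Int))) (fun x => x) with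
  | none =>
    exact absurd ((PySem.List.max?_eq_none_iff _ _).mp hmax) (by simp [pvBa])
  | some m =>
    obtain ⟨c, hc, hmc⟩ := List.mem_map.mp (PySem.List.max?_mem hmax)
    have hmax' : ∀ d ∈ pvBa, ((xs.count d : Nat) : Int) ≤ m := fun d hd =>
      PySem.List.max?_isMax hmax _ (List.mem_map.mpr ⟨d, hd, rfl⟩)
    rw [Option.getD_some]
    by_cases hm0 : m = 0
    · subst hm0
      have hK : pvK xs = 1 := by
        apply le_antisymm _ (one_le_pvK xs)
        apply foldl_max_le _ pvBa 1 1 le_rfl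
        intro d hd
        have := hmax' d hd
        omega
      simp [hK]
    · rw [if_neg hm0, ← hmc]
      have hle : xs.count c ≤ pvK xs := count_le_pvK xs c hc
      have h1 : 1 ≤ xs.count c := by
        rcases Nat.eq_zero_or_pos (xs.count c) with h0 | h0
        · rw [h0] at hmc; omega
        · exact h0
      have hge : pvK xs ≤ xs.count c := by
        apply foldl_max_le _ pvBa 1 (xs.count c) h1
        intro d hd
        have := hmax' d hd
        rw [← hmc] at this
        exact_mod_cast this
      rw [le_antisymm hle hge]

theorem zip_map_self {α β : Type} (g : α → β) (l : List α) :
    l.zip (l.map g) = l.map (fun x => (x, g x)) := by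
  induction l with
  | nil => rfl
  | cons x xs ih => simp [List.zip_cons_cons, ih]

theorem finishB_eq (xs : List Char) :
    (let m : Int := (PySem.List.max? (pvBa.map (fun c => ((xs.count c : Nat) : Int))) (fun x => x)).getD 0
     let k : Int := if m = 0 then 1 else m
     String.ofList ((pvBa.zip (pvBa.map (fun c => ((xs.count c : Nat) : Int)))).flatMap
       (fun p => List.replicate (k - p.2).toNat p.1)))
      = String.ofList (pvM xs) := by
  show String.ofList ((pvBa.zip (pvBa.map (fun c => ((xs.count c : Nat) : Int)))).flatMap
       (fun p => List.replicate
         (((if ((PySem.List.max? (pvBa.map (fun c => ((xs.count c : Nat) : Int))) (fun x => x)).getD 0) = 0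
            then (1 : Int)
            else (PySem.List.max? (pvBa.map (fun c => ((xs.count c : Nat) : Int))) (fun x => x)).getD 0) - p.2).toNat) p.1))
      = String.ofList (pvM xs)
  rw [max_occ_eq_pvK xs, zip_map_self, List.flatMap_map]
  have harg : ∀ c : Char,
      ((pvK xs : Int) - ((xs.count c : Nat) : Int)).toNat = pvK xs - xs.count c := by
    intro c; omega
  simp only [harg]
  rfl

theorem missing_alphabets_alt_eq_pvM (st : String) (h : Pre_missing_alphabets st) :
    missing_alphabets_alt st = String.ofList (pvM st.toList) := by
  unfold missing_alphabets_alt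
  have h0 : (List.replicate 26 (0 : Int)) = pvBa.map (fun c => ((([] : List Char).count c : Nat) : Int)) := by
    decide
  rw [h0, pvStepB_inv st.toList [] (pre_forall st h), List.nil_append]
  exact finishB_eq st.toList

-- ===== VERDICT (by name: the statement is the Claim_ definition above) =====
theorem missing_alphabets_spec : Claim_equal_missing_alphabets := by
  intro st _ hpre
  unfold Spec_missing_alphabets
  rw [missing_alphabets_eq_pvM st hpre, missing_alphabets_alt_eq_pvM st hpre]
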